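-- pv_equiv track=rewrite | github.com/Robgea/Advent-of-Code | Day 14/second.py | list_adder
-- ===== SOURCE A (Python) =====
-- def list_adder(input_list, char):
--     output_list = []
--     if char == 'X':
--         for string in input_list:
--             output_list.append(f'{string}1')
--             output_list.append(f'{string}0')
--     if char == '1':
--         output_list = [f'{entry}1' for entry in input_list]
--
--     if char == '0':
--         output_list = [f'{entry}0' for entry in input_list]
--
--     return output_list
-- ===== SOURCE B (Python) =====
-- def list_adder(input_list, char):
--     if char == 'X':
--         # staged passes: build the two whole lists, then interleave them
--         ones = [f'{entry}1' for entry in input_list]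
--         zeros = [f'{entry}0' for entry in input_list]
--         return [s for pair in zip(ones, zeros) for s in pair]
--     if char in ('1', '0'):
--         return [f'{entry}{char}' for entry in input_list]
--     return []
-- ===== Notes on version B (the rewrite author's own statement) =====
-- stated objective: alternative
-- what changed: For 'X' B makes two separate whole-list passes (all '1'-suffixed, all '0'-suffixed) and then interleaves them with zip, instead of A's single loop appending both variants per element; the '1'/'0' branches are merged into one membership-tested map that appends char itself.
import Mathlib
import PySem

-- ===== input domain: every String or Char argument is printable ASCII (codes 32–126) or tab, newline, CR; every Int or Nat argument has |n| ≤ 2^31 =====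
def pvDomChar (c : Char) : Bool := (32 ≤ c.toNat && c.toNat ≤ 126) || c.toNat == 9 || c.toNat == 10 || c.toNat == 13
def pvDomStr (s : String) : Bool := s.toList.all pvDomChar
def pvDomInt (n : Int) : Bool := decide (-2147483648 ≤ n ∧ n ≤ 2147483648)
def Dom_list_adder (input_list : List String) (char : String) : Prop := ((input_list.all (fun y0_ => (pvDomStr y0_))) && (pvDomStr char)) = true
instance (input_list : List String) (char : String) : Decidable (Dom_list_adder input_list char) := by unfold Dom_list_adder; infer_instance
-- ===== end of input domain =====

-- B builds the 'X' result as two staged whole-list passes interleaved by zip, and merges the '1'/'0' branches into one map appending char itself (objective: alternative).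

-- ===== PORT A =====
def list_adder (input_list : List String) (char : String) : List String :=
  let output_list : List String := []
  let output_list :=
    if char == "X" then
      input_list.foldl (fun acc s => (acc ++ [s ++ "1"]) ++ [s ++ "0"]) output_list
    else output_list
  let output_list :=
    if char == "1" then input_list.map (fun entry => entry ++ "1") else output_list
  let output_list :=
    if char == "0" then input_list.map (fun entry => entry ++ "0") else output_list
  output_list

-- ===== PORT B =====
def list_adder_alt (input_list : List String) (char : String) : List String :=
  if char == "X" then
    let ones := input_list.map (fun entry => entry ++ "1")
    let zeros := input_list.map (fun entry => entry ++ "0")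
    (ones.zip zeros).flatMap (fun p => [p.1, p.2])
  else if char == "1" || char == "0" then
    input_list.map (fun entry => entry ++ char)
  else []

-- ===== PRECONDITION & SPEC =====
def Spec_list_adder (input_list : List String) (char : String) (out : List String) : Prop := out = list_adder_alt input_list char
instance (input_list : List String) (char : String) (out : List String) : Decidable (Spec_list_adder input_list char out) := by unfold Spec_list_adder; infer_instance

-- ===== CLAIM (what is proved, stated in full; the proofs are below) =====
def Claim_equal_list_adder : Prop := ∀ (input_list : List String) (char : String), Dom_list_adder input_list char → Spec_list_adder input_list char (list_adder input_list char)

-- ===== LEMMAS AND PROOFS =====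

-- A's accumulator loop unrolled: foldl with double append equals acc ++ the interleaving.
theorem foldl_double_append {α β : Type} (l : List α) (f g : α → β) (acc : List β) :
    l.foldl (fun a s => (a ++ [f s]) ++ [g s]) acc
      = acc ++ (l.map (fun s => [f s, g s])).flatten := by
  induction l generalizing acc with
  | nil => simp
  | cons x xs ih => simp [List.foldl, ih, List.append_assoc]

-- B's zip of the two mapped lists, flattened pairwise, is the same interleaving.
theorem zip_map_interleave {α β : Type} (l : List α) (f g : α → β) :
    (((l.map f).zip (l.map g)).map (fun p => [p.1, p.2])).flatten
      = (l.map (fun s => [f s, g s])).flatten := by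
  induction l with
  | nil => rfl
  | cons x xs ih => simp [ih]

-- ===== VERDICT (by name: the statement is the Claim_ definition above) =====
theorem list_adder_spec : Claim_equal_list_adder := by
  intro input_list char _
  unfold Spec_list_adder list_adder list_adder_alt
  by_cases hX : char == "X"
  · have h := eq_of_beq hX; subst h
    simp [foldl_double_append, zip_map_interleave, List.flatMap]
  · by_cases h1 : char == "1"
    · have h := eq_of_beq h1; subst h
      simp
    · by_cases h0 : char == "0"
      · have h := eq_of_beq h0; subst h
        simp
      · simp [hX, h1, h0]
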